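-- pv_equiv track=rewrite | github.com/sidemix/nous | agent/consensus/validator.py | get_block_reward
-- ===== SOURCE A (Python) =====
-- GENESIS_RULES = {
--     # === SUPPLY ===
--     "max_supply": 21_000_000 * 10**8,        # 21 million NOUS (in nouslings)
--     "initial_reward": 50 * 10**8,             # 50 NOUS per block
--     "halving_interval": 210_000,              # Halve every 210,000 blocks (~4 years)
--
--     # === CONSENSUS ===
--     "min_stake": 1 * 10**8,                   # 1 NOUS minimum to validate
--     "finality_confirmations": 6,              # 6 blocks = final (~1 hour)
--     "finality_threshold": 0.67,               # 2/3 attestation for block finality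
--     "governance_threshold": 0.90,             # 90% to change non-genesis rules
--
--     # === REWARDS ===
--     "owner_share": 0.90,                      # 90% of rewards to human owner
--     "agent_share": 0.10,                      # 10% of rewards to AI agent
--     "fee_to_producer": 1.00,                  # 100% of tx fees to block producer
--
--     # === SLASHING ===
--     "slash_genesis_violation": 1.00,          # 100% stake loss for genesis violation
--     "slash_minor_infraction": 0.10,           # 10% stake loss for going offline, etc.
--
--     # === IDENTITY ===
--     "network_id": 0x4E4F5553,                 # "NOUS" in hex
--     "genesis_timestamp": "2026-02-01T22:12:51Z",
--     "genesis_message": "Feb 2026 — The first currency mined by AI, owned by humans",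
--     "genesis_owner": "nous:46492157370309f128ca2855bd0daca8cd9a1043",
--
--     # === IMMUTABILITY FLAG ===
--     "genesis_modification": "FORBIDDEN",      # This line can never be changed
--     "genesis_hash": "7da31c120616b05a818beb854245449afb0622b5eeac1b40be891b70b63c4a76",
-- }
--
-- def get_block_reward(height: int) -> int:
--     """
--     Calculate block reward at given height.
--
--     Halves every 210,000 blocks (~4 years at 10-min blocks, same as Bitcoin).
--     """
--     halvings = height // GENESIS_RULES["halving_interval"]
--     reward = GENESIS_RULES["initial_reward"]
--
--     for _ in range(halvings):
--         reward //= 2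
--         if reward == 0:
--             return 0
--
--     return reward
-- ===== SOURCE B (Python) =====
-- GENESIS_RULES = {
--     "initial_reward": 50 * 10**8,
--     "halving_interval": 210_000,
-- }
--
-- def get_block_reward(height: int) -> int:
--     """Closed-form block reward: right-shift instead of the halving loop."""
--     halvings = height // GENESIS_RULES["halving_interval"]
--     reward = GENESIS_RULES["initial_reward"]
--     if halvings <= 0:
--         return reward
--     return reward >> halvings
-- ===== Notes on version B (the rewrite author's own statement) =====
-- stated objective: simpler
-- what changed: Replaces the per-halving floor-division loop with a guarded closed-form right shift (reward >> halvings).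
import Mathlib
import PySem

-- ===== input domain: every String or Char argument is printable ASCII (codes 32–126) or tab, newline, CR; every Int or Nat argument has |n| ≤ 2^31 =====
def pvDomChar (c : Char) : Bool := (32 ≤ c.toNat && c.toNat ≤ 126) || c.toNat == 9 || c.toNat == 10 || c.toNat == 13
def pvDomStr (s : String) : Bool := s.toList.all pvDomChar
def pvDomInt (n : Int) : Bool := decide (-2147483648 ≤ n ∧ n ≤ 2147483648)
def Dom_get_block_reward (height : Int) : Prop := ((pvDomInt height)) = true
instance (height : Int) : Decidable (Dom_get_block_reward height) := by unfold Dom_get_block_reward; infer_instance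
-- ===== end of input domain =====

-- B replaces A's halving loop by a guarded closed-form right shift; equivalence is exact.


-- ===== PORT A =====
-- halving loop: for _ in range(halvings): reward //= 2; if reward == 0: return 0
def rewardLoopA : Nat → Int → Int
  | 0, reward => reward
  | n + 1, reward =>
    let reward' := PySem.Int.floordiv reward 2
    if reward' = 0 then 0 else rewardLoopA n reward'

def get_block_reward (height : Int) : Int :=
  let halvings := PySem.Int.floordiv height 210000
  rewardLoopA halvings.toNat 5000000000

-- ===== PORT B =====
def get_block_reward_alt (height : Int) : Int :=
  let halvings := PySem.Int.floordiv height 210000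
  if halvings ≤ 0 then 5000000000
  else (5000000000 : Int) >>> halvings.toNat


def Spec_get_block_reward (height : Int) (out : Int) : Prop := out = get_block_reward_alt height
instance (height : Int) (out : Int) : Decidable (Spec_get_block_reward height out) := by unfold Spec_get_block_reward; infer_instance

-- ===== CLAIM (what is proved, stated in full; the proofs are below) =====
def Claim_equal_get_block_reward : Prop := ∀ (height : Int), Dom_get_block_reward height → Spec_get_block_reward height (get_block_reward height)

-- ===== LEMMAS AND PROOFS =====

-- ===== VERDICT (by name: the statement is the Claim_ definition above) =====
-- loop = right shift, for nonnegative start value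
theorem rewardLoopA_shift (n : Nat) : ∀ (r : Int), 0 ≤ r → rewardLoopA n r = r >>> n := by
  induction n with
  | zero => intro r hr; simp [rewardLoopA, Int.shiftRight_eq_div_pow]
  | succ n ih =>
    intro r hr
    have h2 : PySem.Int.floordiv r 2 = r / 2 := by
      simp only [PySem.Int.floordiv]; exact Int.fdiv_eq_ediv_of_nonneg _ (by norm_num)
    have hr2 : 0 ≤ r / 2 := Int.ediv_nonneg hr (by norm_num)
    have hstep : r >>> (n + 1) = (r / 2) >>> n := by
      rw [Int.shiftRight_eq_div_pow, Int.shiftRight_eq_div_pow]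
      push_cast
      rw [pow_succ', ← Int.ediv_ediv_of_nonneg (by norm_num : (0:Int) ≤ 2)]
    rw [rewardLoopA, h2]
    split_ifs with h0
    · rw [hstep, h0]; simp [Int.shiftRight_eq_div_pow]
    · rw [ih _ hr2, hstep]

theorem get_block_reward_spec : Claim_equal_get_block_reward := by
  intro height _
  unfold Spec_get_block_reward get_block_reward get_block_reward_alt
  simp only []
  split_ifs with h
  · have : (PySem.Int.floordiv height 210000).toNat = 0 := Int.toNat_of_nonpos h
    rw [this]; rfl
  · exact rewardLoopA_shift _ _ (by norm_num)
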